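-- pv_equiv track=rewrite | github.com/GeZhouyang/3D_bubble_volume | volume.py | mm2
-- ===== SOURCE A (Python) =====
-- def mm2(merge_list_1):
--
--     merge_list_2,merge_list_3 = [],[]
--     lm = len(merge_list_1)
--
--     if lm > 1:
--         for p in range(lm):
--             ap = merge_list_1[p]
--             lp = len(ap)
--             buf = ap.copy()
--             for q in range(lm):
--                 if q != p:
--                     aq = merge_list_1[q] # aq can have more than 2 elements
--                     lq = len(aq)
--                     for r in range(lq):
--                         if aq[r] in ap:
--                             buf = ap if lp >= lq else aq
--
--             merge_list_2.append(buf)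
--
--         for i in range(len(merge_list_2)):
--             a = sorted(merge_list_2[i])
--             if a not in merge_list_3:
--                 merge_list_3.append(a)
--
--     return merge_list_3
-- ===== SOURCE B (Python) =====
-- def mm2(merge_list_1):
--     n = len(merge_list_1)
--     if n <= 1:
--         return []
--     # inverted index: element value -> set of indices of lists containing it
--     index = {}
--     for i, a in enumerate(merge_list_1):
--         for v in a:
--             index.setdefault(v, set()).add(i)
--     out = []
--     for p, ap in enumerate(merge_list_1):
--         hits = set()
--         for v in ap:
--             hits |= index[v]
--         hits.discard(p)
--         if hits:
--             aq = merge_list_1[max(hits)]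
--             buf = ap if len(ap) >= len(aq) else aq
--         else:
--             buf = ap
--         s = sorted(buf)
--         if s not in out:
--             out.append(s)
--     return out
-- ===== Notes on version B (the rewrite author's own statement) =====
-- stated objective: faster
-- what changed: Replaces A's all-pairs nested scan (for every p, rescan every other list element-by-element with linear membership tests) by an inverted index built in one pass (value -> set of list indices); each list's last intersecting partner is then the max of the union of its elements' index sets.
import Mathlib
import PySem

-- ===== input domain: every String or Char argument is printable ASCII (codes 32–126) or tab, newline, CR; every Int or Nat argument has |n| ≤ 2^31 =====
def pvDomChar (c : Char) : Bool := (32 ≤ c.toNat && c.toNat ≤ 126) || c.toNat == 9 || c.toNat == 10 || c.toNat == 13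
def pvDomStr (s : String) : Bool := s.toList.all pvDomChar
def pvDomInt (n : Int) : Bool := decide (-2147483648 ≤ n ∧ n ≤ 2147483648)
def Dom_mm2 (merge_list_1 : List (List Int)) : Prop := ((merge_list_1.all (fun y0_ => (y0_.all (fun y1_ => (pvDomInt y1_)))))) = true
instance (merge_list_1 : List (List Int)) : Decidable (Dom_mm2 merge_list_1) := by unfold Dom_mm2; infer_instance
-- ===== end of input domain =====

-- B replaces A's quadratic all-pairs intersection scan by an inverted index (value → set of
-- list indices) and a max over the hit set; same return value, built with different data.

-- ===== PORT A =====
def mm2 (merge_list_1 : List (List Int)) : List (List Int) :=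
  let lm : Int := merge_list_1.length
  if lm > 1 then
    let merge_list_2 := (PySem.List.pyRange 0 lm 1).foldl (fun ml2 p =>
      let ap := PySem.List.pyGetD merge_list_1 p []
      let lp := ap.length
      let buf := (PySem.List.pyRange 0 lm 1).foldl (fun buf q =>
        if q ≠ p then
          let aq := PySem.List.pyGetD merge_list_1 q []
          let lq := aq.length
          (PySem.List.pyRange 0 (lq : Int) 1).foldl (fun buf r =>
            if PySem.List.pyGetD aq r 0 ∈ ap then (if lp ≥ lq then ap else aq) else buf) buf
        else buf) ap
      ml2 ++ [buf]) []
    (PySem.List.pyRange 0 (merge_list_2.length : Int) 1).foldl (fun ml3 i =>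
      let a := PySem.List.sorted (PySem.List.pyGetD merge_list_2 i []) (fun x => x) false
      if a ∉ ml3 then ml3 ++ [a] else ml3) []
  else []

-- ===== PORT B =====
-- inverted index: element value -> set of indices of the lists containing it
def mm2InvIndex (merge_list_1 : List (List Int)) : PySem.Dict Int (PySem.Set Int) :=
  (PySem.List.enumerate merge_list_1).foldl (fun d ia =>
    ia.2.foldl (fun d v =>
      d.insert v (PySem.Set.add (d.getD v PySem.Set.empty) ia.1)) d) PySem.Dict.empty

def mm2_alt (merge_list_1 : List (List Int)) : List (List Int) :=
  let n := merge_list_1.length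
  if n ≤ 1 then []
  else
    let index := mm2InvIndex merge_list_1
    (PySem.List.enumerate merge_list_1).foldl (fun out pa =>
      let ap := pa.2
      -- index.getD is index[v]: every v ∈ ap is a key of the index (exact here)
      let hits := PySem.Set.discard
        (ap.foldl (fun h v => PySem.Set.union h (index.getD v PySem.Set.empty)) PySem.Set.empty)
        pa.1
      let buf :=
        if hits ≠ [] then
          let aq := PySem.List.pyGetD merge_list_1 ((PySem.List.max? hits (fun x => x)).getD 0) []
          if ap.length ≥ aq.length then ap else aq
        else ap
      let s := PySem.List.sorted buf (fun x => x) false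
      if s ∉ out then out ++ [s] else out) []

-- ===== PRECONDITION & SPEC =====
def Spec_mm2 (merge_list_1 : List (List Int)) (out : List (List Int)) : Prop := out = mm2_alt merge_list_1
instance (merge_list_1 : List (List Int)) (out : List (List Int)) : Decidable (Spec_mm2 merge_list_1 out) := by unfold Spec_mm2; infer_instance

-- ===== CLAIM (what is proved, stated in full; the proofs are below) =====
def Claim_equal_mm2 : Prop := ∀ (merge_list_1 : List (List Int)), Dom_mm2 merge_list_1 → Spec_mm2 merge_list_1 (mm2 merge_list_1)

-- ===== LEMMAS AND PROOFS =====

-- overwrite loop: the last matching element decides (constant overwrite)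
theorem pv_foldl_overwrite {α β : Type} (P : α → Prop) [DecidablePred P] (c : β) :
    ∀ (l : List α) (init : β),
      l.foldl (fun b v => if P v then c else b) init =
        if l.any (fun v => decide (P v)) then c else init := by
  intro l
  induction l with
  | nil => intro init; simp
  | cons a t ih =>
    intro init
    by_cases h : P a <;> simp [h, ih, List.any_cons]

-- a fold that ignores its accumulator keeps the last value
theorem pv_foldl_const {α β : Type} (g : α → β) :
    ∀ (xs : List α) (init : β),
      xs.foldl (fun _ x => g x) init = (xs.getLast?.map g).getD init := by
  intro xs
  induction xs with
  | nil => intro init; simp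
  | cons a t ih =>
    intro init
    cases t with
    | nil => simp
    | cons b u =>
      rw [List.foldl_cons, ih]
      cases hgl : (b :: u).getLast? with
      | none => simp at hgl
      | some y => simp [List.getLast?_cons_cons, hgl]

-- in a strictly increasing list every member is ≤ the last element
theorem pv_le_getLast? {L : List Int} (hp : L.Pairwise (· < ·)) {x y : Int}
    (hx : x ∈ L) (hy : L.getLast? = some y) : x ≤ y := by
  induction L with
  | nil => cases hx
  | cons a t ih =>
    cases t with
    | nil =>
      simp at hx hy; omega
    | cons b u =>
      rw [List.getLast?_cons_cons] at hy
      rcases List.mem_cons.mp hx with rfl | hx'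
      · have hb : ∀ z ∈ b :: u, x < z := (List.pairwise_cons.mp hp).1
        have : y ∈ b :: u := List.mem_of_getLast? (by simpa using hy)
        exact le_of_lt (hb y this)
      · exact ih (List.pairwise_cons.mp hp).2 hx' hy

-- membership in the inner index-building fold over one list
theorem pv_index_inner (i : Int) :
    ∀ (a : List Int) (d : PySem.Dict Int (PySem.Set Int)) (v j : Int),
      j ∈ (a.foldl (fun d v => d.insert v (PySem.Set.add (d.getD v PySem.Set.empty) i)) d).getD v PySem.Set.empty ↔
        j ∈ d.getD v PySem.Set.empty ∨ (v ∈ a ∧ j = i) := by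
  intro a
  induction a with
  | nil => intro d v j; simp
  | cons w t ih =>
    intro d v j
    rw [List.foldl_cons, ih, PySem.Dict.getD_insert]
    by_cases hv : v = w
    · subst hv
      simp only [if_pos trivial, PySem.Set.mem_add, List.mem_cons]
      tauto
    · simp only [if_neg hv, List.mem_cons]
      tauto

-- membership in the full inverted index
theorem pv_index_mem :
    ∀ (l : List (List Int)) (s : Int) (d : PySem.Dict Int (PySem.Set Int)) (v j : Int),
      j ∈ ((PySem.List.enumerate l s).foldl (fun d ia =>
            ia.2.foldl (fun d v => d.insert v (PySem.Set.add (d.getD v PySem.Set.empty) ia.1)) d) d).getD v PySem.Set.empty ↔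
        j ∈ d.getD v PySem.Set.empty ∨ ∃ k : Nat, k < l.length ∧ j = s + k ∧ v ∈ l.getD k [] := by
  intro l
  induction l with
  | nil => intro s d v j; simp [PySem.List.enumerate_nil]
  | cons a t ih =>
    intro s d v j
    rw [PySem.List.enumerate_cons, List.foldl_cons, ih, pv_index_inner]
    constructor
    · rintro ((h | ⟨hv, rfl⟩) | ⟨k, hk, rfl, hm⟩)
      · exact Or.inl h
      · exact Or.inr ⟨0, by simp, by simp, by simpa using hv⟩
      · exact Or.inr ⟨k + 1, by simpa using hk, by push_cast; ring, by simpa using hm⟩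
    · rintro (h | ⟨k, hk, rfl, hm⟩)
      · exact Or.inl (Or.inl h)
      · cases k with
        | zero => exact Or.inl (Or.inr ⟨by simpa using hm, by simp⟩)
        | succ k =>
          exact Or.inr ⟨k, by simpa using hk, by push_cast; ring, by simpa using hm⟩

theorem pv_invIndex_mem (l : List (List Int)) (v j : Int) :
    j ∈ (mm2InvIndex l).getD v PySem.Set.empty ↔
      ∃ k : Nat, k < l.length ∧ j = k ∧ v ∈ l.getD k [] := by
  unfold mm2InvIndex
  rw [show PySem.List.enumerate l = PySem.List.enumerate l 0 from rfl, pv_index_mem]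
  simp [PySem.Dict.empty, PySem.Dict.getD, PySem.Dict.get?]

-- membership in B's union-of-index-sets fold
theorem pv_hits_mem (index : PySem.Dict Int (PySem.Set Int)) :
    ∀ (ap : List Int) (h0 : PySem.Set Int) (j : Int),
      j ∈ ap.foldl (fun h v => PySem.Set.union h (index.getD v PySem.Set.empty)) h0 ↔
        j ∈ h0 ∨ ∃ v ∈ ap, j ∈ index.getD v PySem.Set.empty := by
  intro ap
  induction ap with
  | nil => intro h0 j; simp
  | cons w t ih =>
    intro h0 j
    rw [List.foldl_cons, ih]
    rw [PySem.Set.mem_union]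
    constructor
    · rintro (⟨h | h⟩ | ⟨v, hv, hj⟩)
      · exact Or.inl h
      · exact Or.inr ⟨w, by simp, h⟩
      · exact Or.inr ⟨v, by simp [hv], hj⟩
    · rintro (h | ⟨v, hv, hj⟩)
      · exact Or.inl (Or.inl h)
      · rcases List.mem_cons.mp hv with rfl | hv'
        · exact Or.inl (Or.inr hj)
        · exact Or.inr ⟨v, hv', hj⟩

-- the per-index buffer computed by A's inner double loop equals B's index-based choice
theorem pv_bufA_eq (l : List (List Int)) (p : Int) (hp0 : 0 ≤ p) (hpn : p < (l.length : Int)) :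
    (PySem.List.pyRange 0 (l.length : Int) 1).foldl (fun buf q =>
        if q ≠ p then
          (PySem.List.pyRange 0 ((PySem.List.pyGetD l q []).length : Int) 1).foldl (fun buf r =>
            if PySem.List.pyGetD (PySem.List.pyGetD l q []) r 0 ∈ PySem.List.pyGetD l p [] then
              (if (PySem.List.pyGetD l p []).length ≥ (PySem.List.pyGetD l q []).length then
                PySem.List.pyGetD l p [] else PySem.List.pyGetD l q [])
            else buf) buf
        else buf) (PySem.List.pyGetD l p []) =
      (if PySem.Set.discard
            ((PySem.List.pyGetD l p []).foldl
              (fun h v => PySem.Set.union h ((mm2InvIndex l).getD v PySem.Set.empty)) PySem.Set.empty) p ≠ [] then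
         (if (PySem.List.pyGetD l p []).length ≥
              (PySem.List.pyGetD l
                ((PySem.List.max? (PySem.Set.discard
                  ((PySem.List.pyGetD l p []).foldl
                    (fun h v => PySem.Set.union h ((mm2InvIndex l).getD v PySem.Set.empty)) PySem.Set.empty) p)
                  (fun x => x)).getD 0) []).length then
            PySem.List.pyGetD l p []
          else PySem.List.pyGetD l
                ((PySem.List.max? (PySem.Set.discard
                  ((PySem.List.pyGetD l p []).foldl
                    (fun h v => PySem.Set.union h ((mm2InvIndex l).getD v PySem.Set.empty)) PySem.Set.empty) p)
                  (fun x => x)).getD 0) [])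
       else PySem.List.pyGetD l p []) := by
  set ap := PySem.List.pyGetD l p [] with hap
  set C : Int → List Int := fun q =>
    if ap.length ≥ (PySem.List.pyGetD l q []).length then ap else PySem.List.pyGetD l q []
    with hC
  set Q : Int → Prop := fun q =>
    q ≠ p ∧ (PySem.List.pyGetD l q []).any (fun v => decide (v ∈ ap)) = true with hQ
  set hits : PySem.Set Int := PySem.Set.discard
      (ap.foldl (fun h v => PySem.Set.union h ((mm2InvIndex l).getD v PySem.Set.empty)) PySem.Set.empty) p
    with hhits
  -- rewrite A's loop body into a single guarded overwrite
  have hbody : ∀ (buf : List Int) (q : Int),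
      (if q ≠ p then
          (PySem.List.pyRange 0 ((PySem.List.pyGetD l q []).length : Int) 1).foldl (fun buf r =>
            if PySem.List.pyGetD (PySem.List.pyGetD l q []) r 0 ∈ ap then
              (if ap.length ≥ (PySem.List.pyGetD l q []).length then ap else PySem.List.pyGetD l q [])
            else buf) buf
        else buf) = if Q q then C q else buf := by
    intro buf q
    by_cases hq : q = p
    · simp [hQ, hq]
    · rw [if_pos hq]
      rw [PySem.List.foldl_pyRange_zero_pyGetD' (PySem.List.pyGetD l q []) 0
        (fun b v => if v ∈ ap then
          (if ap.length ≥ (PySem.List.pyGetD l q []).length then ap else PySem.List.pyGetD l q [])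
          else b) buf]
      rw [pv_foldl_overwrite (fun v => v ∈ ap)]
      by_cases hany : (PySem.List.pyGetD l q []).any (fun v => decide (v ∈ ap)) = true
      · rw [if_pos hany, if_pos (show Q q from ⟨hq, hany⟩)]
      · rw [if_neg hany, if_neg (show ¬ Q q from fun hQq => hany hQq.2)]
  have hfold :
      (PySem.List.pyRange 0 (l.length : Int) 1).foldl (fun buf q =>
        if q ≠ p then
          (PySem.List.pyRange 0 ((PySem.List.pyGetD l q []).length : Int) 1).foldl (fun buf r =>
            if PySem.List.pyGetD (PySem.List.pyGetD l q []) r 0 ∈ ap then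
              (if ap.length ≥ (PySem.List.pyGetD l q []).length then ap else PySem.List.pyGetD l q [])
            else buf) buf
        else buf) ap
      = (PySem.List.pyRange 0 (l.length : Int) 1).foldl (fun buf q => if Q q then C q else buf) ap := by
    apply PySem.List.foldl_congr_mem
    intro buf q _
    exact hbody buf q
  rw [hfold, PySem.List.foldl_ite_eq_foldl_filter Q (fun acc q => C q), pv_foldl_const C]
  -- the filtered range and B's hit set have the same members
  have hmem : ∀ j : Int,
      j ∈ ((PySem.List.pyRange 0 (l.length : Int) 1).filter (fun q => decide (Q q))) ↔ j ∈ hits := by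
    intro j
    rw [List.mem_filter, decide_eq_true_iff, PySem.List.mem_pyRange_one, hhits,
      PySem.Set.mem_discard, pv_hits_mem]
    simp only [pv_invIndex_mem]
    simp only [hQ, PySem.Set.empty, List.not_mem_nil, false_or]
    constructor
    · rintro ⟨⟨hj0, hjn⟩, hjp, hany⟩
      rcases List.any_eq_true.mp hany with ⟨v, hv, hvap⟩
      refine ⟨⟨v, (by simpa using hvap), ?_⟩, hjp⟩
      refine ⟨j.toNat, by omega, by omega, ?_⟩
      rwa [show j = (j.toNat : Int) by omega, PySem.List.pyGetD_natCast] at hv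
    · rintro ⟨⟨v, hvap, hvj⟩, hjp⟩
      rcases hvj with ⟨k, hk, rfl, hvk⟩
      refine ⟨⟨by omega, by omega⟩, hjp, ?_⟩
      refine List.any_eq_true.mpr ⟨v, ?_, by simpa using hvap⟩
      rwa [PySem.List.pyGetD_natCast]
  cases hgl : ((PySem.List.pyRange 0 (l.length : Int) 1).filter (fun q => decide (Q q))).getLast? with
  | none =>
    have hF : ((PySem.List.pyRange 0 (l.length : Int) 1).filter (fun q => decide (Q q))) = [] :=
      List.getLast?_eq_none_iff.mp hgl
    have hh : hits = [] := by
      apply List.eq_nil_iff_forall_not_mem.mpr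
      intro j hj
      have := (hmem j).mpr hj
      rw [hF] at this
      exact absurd this (List.not_mem_nil)
    rw [if_neg (by simp [hh])]
    simp
  | some m =>
    have hmF : m ∈ ((PySem.List.pyRange 0 (l.length : Int) 1).filter (fun q => decide (Q q))) :=
      List.mem_of_getLast? hgl
    have hmh : m ∈ hits := (hmem m).mp hmF
    have hne : hits ≠ [] := by
      intro h; rw [h] at hmh; exact absurd hmh (List.not_mem_nil)
    cases hmax : PySem.List.max? hits (fun x => x) with
    | none => exact absurd ((PySem.List.max?_eq_none_iff hits _).mp hmax) hne
    | some m' =>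
      have h1 : m ≤ m' := PySem.List.max?_isMax hmax m hmh
      have h2 : m' ≤ m := by
        apply pv_le_getLast? (List.Pairwise.filter _ (PySem.List.pairwise_lt_pyRange_one 0 (l.length : Int)))
          ((hmem m').mpr (PySem.List.max?_mem hmax)) hgl
      have hmm : m' = m := le_antisymm h2 h1
      rw [if_pos hne]
      simp [hC, hmm]

-- ===== VERDICT (by name: the statement is the Claim_ definition above) =====
theorem mm2_spec : Claim_equal_mm2 := by
  unfold Claim_equal_mm2 Spec_mm2
  intro l _
  by_cases hn : l.length ≤ 1
  · simp only [mm2, mm2_alt]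
    rw [if_neg (by exact_mod_cast by omega : ¬ ((l.length : Int) > 1)), if_pos hn]
  · have h2 : 1 < l.length := by omega
    simp only [mm2, mm2_alt]
    rw [if_pos (by exact_mod_cast h2 : (l.length : Int) > 1), if_neg hn]
    rw [PySem.List.foldl_append_singleton_eq_map]
    rw [List.nil_append]
    rw [PySem.List.foldl_pyRange_zero_pyGetD'
      ((PySem.List.pyRange 0 (l.length : Int) 1).map _) []
      (fun ml3 x => if PySem.List.sorted x (fun y => y) false ∉ ml3 then
        ml3 ++ [PySem.List.sorted x (fun y => y) false] else ml3) []]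
    rw [List.foldl_map]
    rw [PySem.List.enumerate_eq_map_pyRange l []]
    simp only [PySem.List.len_eq]
    rw [List.foldl_map]
    apply PySem.List.foldl_congr_mem
    intro out q hq
    rcases (PySem.List.mem_pyRange_one).mp hq with ⟨hq0, hqn⟩
    simp only []
    rw [pv_bufA_eq l q hq0 hqn]
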